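-- pv_equiv track=rewrite | github.com/CodeByD3v/FoodIntel-AI | nlp/kg_matcher.py | get_diet_tags
-- ===== SOURCE A (Python) =====
-- from typing import List, Dict, Tuple, Optional
--
-- def get_diet_tags(ingredients: List[str]) -> List[str]:
--     """Get applicable diet tags for ingredients."""
--     tags = set()
--
--     ingredient_str = ' '.join(ingredients).lower()
--
--     if any(ing in ingredient_str for ing in ['chicken', 'beef', 'pork', 'fish', 'egg']):
--         tags.add('non_vegan')
--     else:
--         tags.add('vegan')
--
--     high_protein_ingredients = ['chicken', 'beef', 'fish', 'egg', 'tofu', 'lentil', 'bean']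
--     if any(ing in ingredient_str for ing in high_protein_ingredients):
--         tags.add('high_protein')
--
--     high_carb_ingredients = ['rice', 'pasta', 'bread', 'potato', 'sugar']
--     if any(ing in ingredient_str for ing in high_carb_ingredients):
--         tags.add('keto_incompatible')
--
--     dairy_ingredients = ['milk', 'cream', 'cheese', 'butter', 'yogurt']
--     if any(ing in ingredient_str for ing in dairy_ingredients):
--         tags.add('contains_dairy')
--
--     return list(tags)
-- ===== SOURCE B (Python) =====
-- from typing import List
--
-- MEAT_KEYWORDS = ('chicken', 'beef', 'pork', 'fish', 'egg')
-- PROTEIN_KEYWORDS = ('chicken', 'beef', 'fish', 'egg', 'tofu', 'lentil', 'bean')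
-- CARB_KEYWORDS = ('rice', 'pasta', 'bread', 'potato', 'sugar')
-- DAIRY_KEYWORDS = ('milk', 'cream', 'cheese', 'butter', 'yogurt')
--
--
-- def get_diet_tags(ingredients: List[str]) -> List[str]:
--     """Get applicable diet tags for ingredients (single pass, no joined string)."""
--     has_meat = has_protein = has_carb = has_dairy = False
--     for ing in ingredients:
--         low = ing.lower()
--         has_meat = has_meat or any(k in low for k in MEAT_KEYWORDS)
--         has_protein = has_protein or any(k in low for k in PROTEIN_KEYWORDS)
--         has_carb = has_carb or any(k in low for k in CARB_KEYWORDS)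
--         has_dairy = has_dairy or any(k in low for k in DAIRY_KEYWORDS)
--     tags = ['non_vegan' if has_meat else 'vegan']
--     if has_protein:
--         tags.append('high_protein')
--     if has_carb:
--         tags.append('keto_incompatible')
--     if has_dairy:
--         tags.append('contains_dairy')
--     return tags
-- ===== Notes on version B (the rewrite author's own statement) =====
-- stated objective: alternative
-- what changed: B drops A's joined ' '.join string entirely: one pass over the ingredients OR-accumulates four boolean category flags (substring tests per lowered ingredient), and the tag list is assembled from the flags afterwards; this is exact because no keyword contains a space, so none can straddle a join boundary.
import Mathlib
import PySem

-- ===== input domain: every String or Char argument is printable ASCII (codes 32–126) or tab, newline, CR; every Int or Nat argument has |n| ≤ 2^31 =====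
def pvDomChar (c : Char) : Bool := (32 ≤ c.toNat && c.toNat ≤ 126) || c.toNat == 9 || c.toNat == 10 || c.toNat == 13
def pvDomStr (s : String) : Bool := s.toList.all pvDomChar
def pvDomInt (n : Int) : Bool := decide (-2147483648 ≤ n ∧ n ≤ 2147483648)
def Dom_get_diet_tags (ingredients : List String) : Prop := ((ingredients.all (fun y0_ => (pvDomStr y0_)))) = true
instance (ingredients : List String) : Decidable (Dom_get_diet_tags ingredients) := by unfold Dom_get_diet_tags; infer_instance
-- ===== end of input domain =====

-- B replaces A's joined string (scanned once per keyword category) by one pass over the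
-- ingredients that OR-accumulates four boolean flags and then assembles the tag list;
-- outputs agree because no keyword contains a space, so it cannot straddle a join boundary.
-- The equivalence is about the returned tag COLLECTION (the Python return, list(set), has
-- no specified order); both ports emit the tags in A's set-insertion order.

-- ===== PORT A =====
def get_diet_tags (ingredients : List String) : List String :=
  let tags : PySem.Set String := PySem.Set.empty
  let ingredient_str : String := PySem.Str.lower (PySem.Str.join " " ingredients)
  let tags :=
    if ["chicken", "beef", "pork", "fish", "egg"].any
        (fun ing => PySem.Str.isIn ing ingredient_str) then
      tags.add "non_vegan"
    else
      tags.add "vegan"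
  let tags :=
    if ["chicken", "beef", "fish", "egg", "tofu", "lentil", "bean"].any
        (fun ing => PySem.Str.isIn ing ingredient_str) then
      tags.add "high_protein"
    else tags
  let tags :=
    if ["rice", "pasta", "bread", "potato", "sugar"].any
        (fun ing => PySem.Str.isIn ing ingredient_str) then
      tags.add "keto_incompatible"
    else tags
  let tags :=
    if ["milk", "cream", "cheese", "butter", "yogurt"].any
        (fun ing => PySem.Str.isIn ing ingredient_str) then
      tags.add "contains_dairy"
    else tags
  tags

-- ===== PORT B =====
def pvMeatKeywords : List String := ["chicken", "beef", "pork", "fish", "egg"]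
def pvProteinKeywords : List String := ["chicken", "beef", "fish", "egg", "tofu", "lentil", "bean"]
def pvCarbKeywords : List String := ["rice", "pasta", "bread", "potato", "sugar"]
def pvDairyKeywords : List String := ["milk", "cream", "cheese", "butter", "yogurt"]

def get_diet_tags_alt (ingredients : List String) : List String :=
  let flags : Bool × Bool × Bool × Bool :=
    ingredients.foldl
      (fun f ing =>
        let low := PySem.Str.lower ing
        (f.1 || pvMeatKeywords.any (fun k => PySem.Str.isIn k low),
         f.2.1 || pvProteinKeywords.any (fun k => PySem.Str.isIn k low),
         f.2.2.1 || pvCarbKeywords.any (fun k => PySem.Str.isIn k low),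
         f.2.2.2 || pvDairyKeywords.any (fun k => PySem.Str.isIn k low)))
      (false, false, false, false)
  (if flags.1 then ["non_vegan"] else ["vegan"])
    ++ (if flags.2.1 then ["high_protein"] else [])
    ++ (if flags.2.2.1 then ["keto_incompatible"] else [])
    ++ (if flags.2.2.2 then ["contains_dairy"] else [])

-- ===== PRECONDITION & SPEC =====
def Spec_get_diet_tags (ingredients : List String) (out : List String) : Prop := out = get_diet_tags_alt ingredients
instance (ingredients : List String) (out : List String) : Decidable (Spec_get_diet_tags ingredients out) := by unfold Spec_get_diet_tags; infer_instance

-- ===== CLAIM (what is proved, stated in full; the proofs are below) =====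
def Claim_equal_get_diet_tags : Prop := ∀ (ingredients : List String), Dom_get_diet_tags ingredients → Spec_get_diet_tags ingredients (get_diet_tags ingredients)

-- ===== LEMMAS AND PROOFS =====

-- A prefix of a ++ c :: b that avoids c is a prefix of a.
lemma pv_prefix_split {p : List Char} {c : Char} (hc : c ∉ p) :
    ∀ {a b : List Char}, p <+: a ++ c :: b → p <+: a := by
  induction p with
  | nil => intro a b _; exact List.nil_prefix
  | cons q p' ih =>
    intro a b h
    cases a with
    | nil =>
      exfalso
      rcases List.cons_prefix_cons.mp h with ⟨rfl, _⟩
      exact hc (List.mem_cons_self)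
    | cons x a' =>
      rcases List.cons_prefix_cons.mp h with ⟨rfl, h'⟩
      exact List.cons_prefix_cons.mpr ⟨rfl, ih (fun m => hc (List.mem_cons_of_mem _ m)) h'⟩

-- An infix of a ++ c :: b that avoids c lies wholly in a or wholly in b.
lemma pv_infix_split {p : List Char} {c : Char} (hc : c ∉ p) :
    ∀ {a b : List Char}, p <:+: a ++ c :: b ↔ (p <:+: a ∨ p <:+: b) := by
  intro a b
  induction a with
  | nil =>
    simp only [List.nil_append]
    constructor
    · intro h
      rcases List.infix_cons_iff.mp h with h | h
      · left
        have hnil := List.prefix_nil.mp (pv_prefix_split hc (a := []) (b := b) h)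
        rw [hnil]
      · exact Or.inr h
    · rintro (h | h)
      · rw [List.infix_nil.mp h]; exact List.nil_infix
      · exact List.infix_cons h
  | cons x a' ih =>
    constructor
    · intro h
      rcases List.infix_cons_iff.mp h with h | h
      · exact Or.inl (pv_prefix_split hc h).isInfix
      · rcases ih.mp h with h | h
        · exact Or.inl (List.infix_cons h)
        · exact Or.inr h
    · rintro (h | h)
      · exact h.trans (List.prefix_append _ _).isInfix
      · exact List.infix_cons (ih.mpr (Or.inr h))

-- A nonempty space-free pattern is an infix of ' '-intercalated pieces iff it is an infix of a piece.
lemma pv_infix_intercalate {p : List Char} (hp : p ≠ []) (hc : ' ' ∉ p) :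
    ∀ ls : List (List Char), p <:+: [' '].intercalate ls ↔ ∃ x ∈ ls, p <:+: x := by
  intro ls
  induction ls with
  | nil =>
    simp only [List.intercalate, List.intersperse, List.flatten_nil, List.not_mem_nil]
    simp [List.infix_nil, hp]
  | cons x rest ih =>
    cases rest with
    | nil => simp [List.intercalate, List.intersperse]
    | cons y rest' =>
      have hstep : [' '].intercalate (x :: y :: rest') = x ++ ' ' :: [' '].intercalate (y :: rest') := by
        simp [List.intercalate, List.intersperse]
      rw [hstep, pv_infix_split hc, ih]
      constructor
      · rintro (h | ⟨z, hz, h⟩)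
        · exact ⟨x, by simp, h⟩
        · exact ⟨z, by simp [hz], h⟩
      · rintro ⟨z, hz, h⟩
        rcases List.mem_cons.mp hz with rfl | hz
        · exact Or.inl h
        · exact Or.inr ⟨z, hz, h⟩

-- lowercasing distributes over the space-join (lowerChar ' ' = ' ').
lemma pv_lower_intercalate (ls : List (List Char)) :
    PySem.Chars.lower ([' '].intercalate ls) = [' '].intercalate (ls.map PySem.Chars.lower) := by
  induction ls with
  | nil => simp [List.intercalate, List.intersperse, PySem.Chars.lower]
  | cons x rest ih =>
    cases rest with
    | nil => simp [List.intercalate, List.intersperse]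
    | cons y rest' =>
      have h1 : [' '].intercalate (x :: y :: rest') = x ++ ' ' :: [' '].intercalate (y :: rest') := by
        simp [List.intercalate, List.intersperse]
      have h2 : [' '].intercalate (PySem.Chars.lower x :: PySem.Chars.lower y :: rest'.map PySem.Chars.lower)
          = PySem.Chars.lower x ++ ' ' :: [' '].intercalate (PySem.Chars.lower y :: rest'.map PySem.Chars.lower) := by
        simp [List.intercalate, List.intersperse]
      simp only [List.map_cons] at ih ⊢
      rw [h1, h2, ← ih]
      simp [PySem.Chars.lower, (by decide : PySem.Chars.lowerChar ' ' = ' ')]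

-- one keyword against the lowered joined string = that keyword against each lowered ingredient.
lemma pv_isIn_joined (k : String) (hne : k.toList ≠ []) (hsp : ' ' ∉ k.toList)
    (ings : List String) :
    PySem.Str.isIn k (PySem.Str.lower (PySem.Str.join " " ings))
      = ings.any (fun ing => PySem.Str.isIn k (PySem.Str.lower ing)) := by
  rw [Bool.eq_iff_iff, PySem.Str.isIn_iff_infix, PySem.Str.toList_lower, PySem.Str.toList_join,
    List.any_eq_true]
  have hsep : (" " : String).toList = [' '] := rfl
  rw [hsep]
  show k.toList <:+: PySem.Chars.lower ([' '].intercalate (ings.map String.toList)) ↔ _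
  rw [pv_lower_intercalate, pv_infix_intercalate hne hsp, List.map_map]
  constructor
  · rintro ⟨x, hx, h⟩
    rcases List.mem_map.mp hx with ⟨ing, hing, rfl⟩
    refine ⟨ing, hing, ?_⟩
    rw [PySem.Str.isIn_iff_infix, PySem.Str.toList_lower]
    exact h
  · rintro ⟨ing, hing, h⟩
    refine ⟨PySem.Chars.lower ing.toList, List.mem_map.mpr ⟨ing, hing, rfl⟩, ?_⟩
    rw [PySem.Str.isIn_iff_infix, PySem.Str.toList_lower] at h
    exact h

-- a keyword LIST against the joined string = per-ingredient any of the same keyword list.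
lemma pv_any_joined (ks : List String)
    (h : ∀ k ∈ ks, k.toList ≠ [] ∧ ' ' ∉ k.toList) (ings : List String) :
    ks.any (fun k => PySem.Str.isIn k (PySem.Str.lower (PySem.Str.join " " ings)))
      = ings.any (fun ing => ks.any (fun k => PySem.Str.isIn k (PySem.Str.lower ing))) := by
  rw [Bool.eq_iff_iff]
  simp only [List.any_eq_true]
  constructor
  · rintro ⟨k, hk, hin⟩
    rw [pv_isIn_joined k (h k hk).1 (h k hk).2, List.any_eq_true] at hin
    rcases hin with ⟨ing, hing, hin⟩
    exact ⟨ing, hing, k, hk, hin⟩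
  · rintro ⟨ing, hing, k, hk, hin⟩
    refine ⟨k, hk, ?_⟩
    rw [pv_isIn_joined k (h k hk).1 (h k hk).2, List.any_eq_true]
    exact ⟨ing, hing, hin⟩

-- B's flag fold computes the four per-category 'any's.
lemma pv_flags_fold (ings : List String) :
    ∀ f : Bool × Bool × Bool × Bool,
      ings.foldl
        (fun f ing =>
          let low := PySem.Str.lower ing
          (f.1 || pvMeatKeywords.any (fun k => PySem.Str.isIn k low),
           f.2.1 || pvProteinKeywords.any (fun k => PySem.Str.isIn k low),
           f.2.2.1 || pvCarbKeywords.any (fun k => PySem.Str.isIn k low),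
           f.2.2.2 || pvDairyKeywords.any (fun k => PySem.Str.isIn k low))) f
      = (f.1 || ings.any (fun ing => pvMeatKeywords.any (fun k => PySem.Str.isIn k (PySem.Str.lower ing))),
         f.2.1 || ings.any (fun ing => pvProteinKeywords.any (fun k => PySem.Str.isIn k (PySem.Str.lower ing))),
         f.2.2.1 || ings.any (fun ing => pvCarbKeywords.any (fun k => PySem.Str.isIn k (PySem.Str.lower ing))),
         f.2.2.2 || ings.any (fun ing => pvDairyKeywords.any (fun k => PySem.Str.isIn k (PySem.Str.lower ing)))) := by
  induction ings with
  | nil => intro f; simp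
  | cons x rest ih =>
    intro f
    simp only [List.foldl_cons, ih, List.any_cons, Bool.or_assoc]

-- ===== VERDICT (by name: the statement is the Claim_ definition above) =====
theorem get_diet_tags_spec : Claim_equal_get_diet_tags := by
  unfold Claim_equal_get_diet_tags
  intro ings _
  unfold Spec_get_diet_tags
  show get_diet_tags ings = get_diet_tags_alt ings
  unfold get_diet_tags get_diet_tags_alt
  simp only [pv_flags_fold, Bool.false_or]
  rw [show (["chicken", "beef", "pork", "fish", "egg"] : List String) = pvMeatKeywords from rfl,
      show (["chicken", "beef", "fish", "egg", "tofu", "lentil", "bean"] : List String) = pvProteinKeywords from rfl,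
      show (["rice", "pasta", "bread", "potato", "sugar"] : List String) = pvCarbKeywords from rfl,
      show (["milk", "cream", "cheese", "butter", "yogurt"] : List String) = pvDairyKeywords from rfl,
      pv_any_joined pvMeatKeywords (by decide) ings,
      pv_any_joined pvProteinKeywords (by decide) ings,
      pv_any_joined pvCarbKeywords (by decide) ings,
      pv_any_joined pvDairyKeywords (by decide) ings]
  cases ings.any (fun ing => pvMeatKeywords.any (fun k => PySem.Str.isIn k (PySem.Str.lower ing))) <;>
  cases ings.any (fun ing => pvProteinKeywords.any (fun k => PySem.Str.isIn k (PySem.Str.lower ing))) <;>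
  cases ings.any (fun ing => pvCarbKeywords.any (fun k => PySem.Str.isIn k (PySem.Str.lower ing))) <;>
  cases ings.any (fun ing => pvDairyKeywords.any (fun k => PySem.Str.isIn k (PySem.Str.lower ing))) <;>
  rfl
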